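-- pv_equiv track=rewrite | github.com/citraput/pwd-jcds-bdg | pr9-citra-dputri.py | rotasi
-- ===== SOURCE A (Python) =====
-- def rotasi(x):
--     z = ''
--
--     if x == 1:
--         for i in range(21, 26):
--             for j in range(0, 25, 5):
--                 z += str(i - j) + ' '
--             z += '\n'
--
--     elif x == 2:
--         for i in range(25, 0, -5):
--             for j in range(i + 1, i - 4, -1):
--                 z += str(j - 1) + ' '
--             z += '\n'
--
--     elif x == 3:
--         for i in range(6, 1, -1):
--             for j in range(0, 5):
--                 z += str(i - 1 + (5 * j)) + ' '
--             z += '\n'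
--
--     elif x == 4:
--         for i in range(0, 25, 5):
--             for j in range(i, i + 5):
--                 z += str(j + 1) + ' '
--             z += '\n'
--
--     return f"Pilihan {x}\n{z}"
-- ===== SOURCE B (Python) =====
-- def rotasi(x):
--     grid = [[5 * r + c + 1 for c in range(5)] for r in range(5)]
--     if x == 1:
--         g = [list(reversed(col)) for col in zip(*grid)]
--     elif x == 2:
--         g = [row[::-1] for row in grid[::-1]]
--     elif x == 3:
--         g = [list(col) for col in zip(*grid)][::-1]
--     elif x == 4:
--         g = grid
--     else:
--         g = []
--     z = ''.join(''.join(str(n) + ' ' for n in row) + '\n' for row in g)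
--     return f"Pilihan {x}\n{z}"
-- ===== Notes on version B (the rewrite author's own statement) =====
-- stated objective: idiomatic
-- what changed: B builds the base 5x5 grid once and derives each orientation by rotating it (transpose/reverse) then joins rows into the string, replacing A's four hand-tuned index-arithmetic loop nests.
import Mathlib
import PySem

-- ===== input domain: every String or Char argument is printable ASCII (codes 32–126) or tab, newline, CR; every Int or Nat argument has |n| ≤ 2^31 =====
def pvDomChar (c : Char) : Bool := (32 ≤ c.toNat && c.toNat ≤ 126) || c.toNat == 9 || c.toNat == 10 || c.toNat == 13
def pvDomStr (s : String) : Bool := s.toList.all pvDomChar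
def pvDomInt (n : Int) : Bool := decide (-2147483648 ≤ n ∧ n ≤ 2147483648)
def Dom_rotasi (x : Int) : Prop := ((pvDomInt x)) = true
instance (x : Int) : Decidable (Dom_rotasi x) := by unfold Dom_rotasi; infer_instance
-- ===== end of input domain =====

-- B change (idiomatic): build the base 5x5 grid once and map x to a rotation of it
-- (transpose / reverse), instead of four hand-tuned index-arithmetic loop nests.

-- ===== PORT A =====
def rotasi (x : Int) : String :=
  "Pilihan " ++ PySem.Int.toStr x ++ "\n" ++
  (if x == 1 then
    (PySem.List.pyRange 21 26 1).foldl (fun z i =>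
      ((PySem.List.pyRange 0 25 5).foldl (fun z j => z ++ PySem.Int.toStr (i - j) ++ " ") z) ++ "\n") ""
  else if x == 2 then
    (PySem.List.pyRange 25 0 (-5)).foldl (fun z i =>
      ((PySem.List.pyRange (i + 1) (i - 4) (-1)).foldl (fun z j => z ++ PySem.Int.toStr (j - 1) ++ " ") z) ++ "\n") ""
  else if x == 3 then
    (PySem.List.pyRange 6 1 (-1)).foldl (fun z i =>
      ((PySem.List.pyRange 0 5 1).foldl (fun z j => z ++ PySem.Int.toStr (i - 1 + 5 * j) ++ " ") z) ++ "\n") ""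
  else if x == 4 then
    (PySem.List.pyRange 0 25 5).foldl (fun z i =>
      ((PySem.List.pyRange i (i + 5) 1).foldl (fun z j => z ++ PySem.Int.toStr (j + 1) ++ " ") z) ++ "\n") ""
  else "")

-- ===== PORT B =====
-- zip(*g) for the rectangular 5-wide grid built below (exact there)
def pyTranspose5 (g : List (List Int)) : List (List Int) :=
  (List.range 5).map (fun c => g.map (fun row => row.getD c 0))

def rotasi_alt (x : Int) : String :=
  let grid : List (List Int) :=
    (List.range 5).map (fun r => (List.range 5).map (fun c => (5 * r + c + 1 : Int)))
  let g : List (List Int) :=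
    if x == 1 then (pyTranspose5 grid).map List.reverse          -- rotate 90° cw
    else if x == 2 then grid.reverse.map List.reverse            -- rotate 180°
    else if x == 3 then (pyTranspose5 grid).reverse              -- rotate 90° ccw
    else if x == 4 then grid
    else []
  let z := String.join (g.map (fun row =>
    String.join (row.map (fun n => PySem.Int.toStr n ++ " ")) ++ "\n"))
  "Pilihan " ++ PySem.Int.toStr x ++ "\n" ++ z

-- ===== PRECONDITION & SPEC =====
def Spec_rotasi (x : Int) (out : String) : Prop := out = rotasi_alt x
instance (x : Int) (out : String) : Decidable (Spec_rotasi x out) := by unfold Spec_rotasi; infer_instance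

-- ===== CLAIM (what is proved, stated in full; the proofs are below) =====
def Claim_equal_rotasi : Prop := ∀ (x : Int), Dom_rotasi x → Spec_rotasi x (rotasi x)

-- ===== LEMMAS AND PROOFS =====

-- ===== VERDICT (by name: the statement is the Claim_ definition above) =====
theorem rotasi_spec : Claim_equal_rotasi := by
  intro x _
  unfold Spec_rotasi
  by_cases h1 : x = 1
  · subst h1; decide
  by_cases h2 : x = 2
  · subst h2; decide
  by_cases h3 : x = 3
  · subst h3; decide
  by_cases h4 : x = 4
  · subst h4; decide
  · simp [rotasi, rotasi_alt, h1, h2, h3, h4, String.join]
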